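-- pv_equiv track=rewrite | github.com/cormeumxd/midbox | main.py | n_groups_random
-- ===== SOURCE A (Python) =====
-- def sumDigits(n):
--     r = 0
--     while n:
--         r, n = r + n % 10, n // 10
--     return r
--
-- def n_groups_random(n_customers, n_first_id):
--     d = {}
--     for i in range(n_first_id, n_customers + n_first_id):
--         sum_dig = sumDigits(i)
--         if d.get(str(sum_dig)) is None:
--             d[str(sum_dig)] = 1
--         else:
--             d[str(sum_dig)] += 1
--     return d
-- ===== SOURCE B (Python) =====
-- def n_groups_random(n_customers, n_first_id):
--     def dsum(n):
--         s = 0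
--         while n > 0:
--             s += n % 10
--             n //= 10
--         return s
--     lo = n_first_id
--     hi = n_customers + n_first_id
--     counts = {}
--     for q in range(lo // 10, (hi + 9) // 10):
--         base = dsum(q)
--         for i in range(max(lo, 10 * q), min(hi, 10 * q + 10)):
--             key = str(base + i - 10 * q)
--             counts[key] = counts.get(key, 0) + 1
--     return counts
-- ===== Notes on version B (the rewrite author's own statement) =====
-- stated objective: faster
-- what changed: A extracts every digit of every id (a full digit loop per element); B decomposes the range into aligned decades, computes the digit sum of each decade prefix q once, and fills the counts for the whole decade as base+last_digit, so the digit loop runs once per 10 ids instead of once per id.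
import Mathlib
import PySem

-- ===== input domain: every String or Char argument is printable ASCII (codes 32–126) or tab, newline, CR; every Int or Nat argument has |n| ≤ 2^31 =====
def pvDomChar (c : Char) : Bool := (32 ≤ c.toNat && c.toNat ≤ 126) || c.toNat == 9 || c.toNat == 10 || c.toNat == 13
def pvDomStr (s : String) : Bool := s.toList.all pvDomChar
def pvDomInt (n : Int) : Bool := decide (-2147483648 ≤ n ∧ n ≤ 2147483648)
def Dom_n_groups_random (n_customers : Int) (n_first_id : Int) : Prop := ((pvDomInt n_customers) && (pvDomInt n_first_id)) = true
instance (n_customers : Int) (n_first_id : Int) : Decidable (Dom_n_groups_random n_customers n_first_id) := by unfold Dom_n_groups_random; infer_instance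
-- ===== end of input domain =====

-- B decomposes the id range into aligned decades: the digit sum of the decade prefix is
-- computed once per decade and shared by its (up to) ten ids (objective: faster, constant factor).

-- ===== PORT A =====
-- while n: r, n = r + n % 10, n // 10  (tail recursion with accumulator r).
-- The guard is 0 < n rather than n ≠ 0 only to make the recursion total: for n < 0 the
-- Python while-loop never terminates, and Pre_ excludes every input reaching such an n.
def sumDigitsA (r n : Int) : Int :=
  if _h : 0 < n then sumDigitsA (r + PySem.Int.mod n 10) (PySem.Int.floordiv n 10) else r
termination_by n.toNat
decreasing_by
  rw [PySem.Int.floordiv_eq_ediv_of_pos (by norm_num : (0:Int) < 10)]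
  omega

def n_groups_random (n_customers : Int) (n_first_id : Int) : List (String × Int) :=
  ((PySem.List.pyRange n_first_id (n_customers + n_first_id) 1).foldl
    (fun d i =>
      let sum_dig := sumDigitsA 0 i
      match d.get? (PySem.Int.toStr sum_dig) with
      | none => d.insert (PySem.Int.toStr sum_dig) 1
      | some v => d.insert (PySem.Int.toStr sum_dig) (v + 1))
    (PySem.Dict.empty : PySem.Dict String Int)).items

-- ===== PORT B =====
-- s = 0; while n > 0: s += n % 10; n //= 10  (B's inner digit-sum helper)
def dsumB (s n : Int) : Int :=
  if _h : 0 < n then dsumB (s + PySem.Int.mod n 10) (PySem.Int.floordiv n 10) else s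
termination_by n.toNat
decreasing_by
  rw [PySem.Int.floordiv_eq_ediv_of_pos (by norm_num : (0:Int) < 10)]
  omega

def n_groups_random_alt (n_customers : Int) (n_first_id : Int) : List (String × Int) :=
  let lo := n_first_id
  let hi := n_customers + n_first_id
  ((PySem.List.pyRange (PySem.Int.floordiv lo 10) (PySem.Int.floordiv (hi + 9) 10) 1).foldl
    (fun d q =>
      let base := dsumB 0 q
      (PySem.List.pyRange (max lo (10 * q)) (min hi (10 * q + 10)) 1).foldl
        (fun d i =>
          let key := PySem.Int.toStr (base + i - 10 * q)
          d.insert key (d.getD key 0 + 1)) d)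
    (PySem.Dict.empty : PySem.Dict String Int)).items

-- ===== PRECONDITION & SPEC =====
-- Pre_ excludes non-empty ranges that start below 0: there A's sumDigits while-loop never
-- terminates (n // 10 stalls at -1), so A returns on exactly the inputs admitted here.
def Pre_n_groups_random (n_customers : Int) (n_first_id : Int) : Prop :=
  n_customers ≤ 0 ∨ 0 ≤ n_first_id
instance (n_customers : Int) (n_first_id : Int) : Decidable (Pre_n_groups_random n_customers n_first_id) := by unfold Pre_n_groups_random; infer_instance
def pvWitness_n_groups_random : Int × Int := (3, 8)

def Spec_n_groups_random (n_customers : Int) (n_first_id : Int) (out : List (String × Int)) : Prop := out = n_groups_random_alt n_customers n_first_id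
instance (n_customers : Int) (n_first_id : Int) (out : List (String × Int)) : Decidable (Spec_n_groups_random n_customers n_first_id out) := by unfold Spec_n_groups_random; infer_instance

-- ===== CLAIM (what is proved, stated in full; the proofs are below) =====
def Claim_equal_n_groups_random : Prop := ∀ (n_customers : Int) (n_first_id : Int), Dom_n_groups_random n_customers n_first_id → Pre_n_groups_random n_customers n_first_id → Spec_n_groups_random n_customers n_first_id (n_groups_random n_customers n_first_id)

-- ===== LEMMAS AND PROOFS =====

-- the two digit-sum helpers have syntactically identical recursions
lemma sumDigitsA_eq_dsumB : ∀ (m : Nat) (n : Int), n.toNat = m → ∀ r, sumDigitsA r n = dsumB r n := by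
  intro m
  induction m using Nat.strong_induction_on with
  | _ m ih =>
    intro n hm r
    rw [sumDigitsA, dsumB]
    split_ifs with h
    · have : (PySem.Int.floordiv n 10).toNat < m := by
        rw [PySem.Int.floordiv_eq_ediv_of_pos (by norm_num : (0:Int) < 10)]; omega
      exact ih _ this _ rfl _
    · rfl

-- accumulator lemma
lemma dsumB_acc : ∀ (m : Nat) (n : Int), n.toNat = m → ∀ r, dsumB r n = r + dsumB 0 n := by
  intro m
  induction m using Nat.strong_induction_on with
  | _ m ih =>
    intro n hm r
    by_cases h : 0 < n
    · have hlt : (PySem.Int.floordiv n 10).toNat < m := by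
        rw [PySem.Int.floordiv_eq_ediv_of_pos (by norm_num : (0:Int) < 10)]; omega
      rw [dsumB, dif_pos h, ih _ hlt _ rfl]
      conv_rhs => rw [dsumB, dif_pos h, ih _ hlt _ rfl]
      ring
    · rw [dsumB, dif_neg h]
      conv_rhs => rw [dsumB, dif_neg h]
      ring

-- digit sum of 10*q + d, 0 ≤ d < 10, q ≥ 0
lemma dsumB_decade (q d : Int) (hq : 0 ≤ q) (hd0 : 0 ≤ d) (hd : d < 10) :
    dsumB 0 (10 * q + d) = dsumB 0 q + d := by
  by_cases h : 0 < 10 * q + d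
  · rw [dsumB, dif_pos h]
    have hmod : PySem.Int.mod (10 * q + d) 10 = d := by
      rw [PySem.Int.mod_eq_emod_of_pos (by norm_num : (0:Int) < 10)]
      omega
    have hdiv : PySem.Int.floordiv (10 * q + d) 10 = q := by
      rw [PySem.Int.floordiv_eq_ediv_of_pos (by norm_num : (0:Int) < 10)]
      omega
    rw [hmod, hdiv, dsumB_acc q.toNat q rfl]
    ring
  · have hq0 : q = 0 := by omega
    have hd0' : d = 0 := by omega
    subst hq0; subst hd0'
    norm_num

-- A's dict step in getD form
lemma step_insert_getD (d : PySem.Dict String Int) (k : String) :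
    (match d.get? k with
     | none => d.insert k 1
     | some v => d.insert k (v + 1)) = d.insert k (d.getD k 0 + 1) := by
  cases h : d.get? k with
  | none => simp [PySem.Dict.getD, h]
  | some v => simp [PySem.Dict.getD, h]

-- foldl over a flatMap is the nested foldl
lemma foldl_flatMap' {α β γ : Type} (l : List α) (f : α → List β) (g : γ → β → γ) (init : γ) :
    (l.flatMap f).foldl g init = l.foldl (fun acc a => (f a).foldl g acc) init := by
  induction l generalizing init with
  | nil => rfl
  | cons x t ih => simp [List.flatMap_cons, List.foldl_append, ih]

-- the decade decomposition of an integer range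
lemma range_decade_decomp : ∀ (k : Nat) (lo hi : Int),
    ((hi + 9) / 10 - lo / 10).toNat = k →
    PySem.List.pyRange lo hi 1 =
      (PySem.List.pyRange (lo / 10) ((hi + 9) / 10) 1).flatMap
        (fun q => PySem.List.pyRange (max lo (10 * q)) (min hi (10 * q + 10)) 1) := by
  intro k
  induction k with
  | zero =>
    intro lo hi hk
    have h1 : (hi + 9) / 10 ≤ lo / 10 := by omega
    have hhle : hi ≤ lo := by omega
    rw [PySem.List.pyRange_one_eq_nil hhle, PySem.List.pyRange_one_eq_nil h1]
    rfl
  | succ k ih =>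
    intro lo hi hk
    set q0 := lo / 10 with hq0
    have hqlt : q0 < (hi + 9) / 10 := by omega
    have hlo1 : 10 * q0 ≤ lo := by omega
    have hlo2 : lo < 10 * q0 + 10 := by omega
    rw [PySem.List.pyRange_one_cons hqlt, List.flatMap_cons]
    have hmax : max lo (10 * q0) = lo := by omega
    rw [hmax]
    by_cases hcase : hi ≤ 10 * q0 + 10
    · -- last (or only) decade: the head block is the whole range, the tail blocks are empty
      have hmin : min hi (10 * q0 + 10) = hi := by omega
      rw [hmin]
      have htail : ((PySem.List.pyRange (q0 + 1) ((hi + 9) / 10) 1).flatMap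
          (fun q => PySem.List.pyRange (max lo (10 * q)) (min hi (10 * q + 10)) 1)) = [] := by
        apply List.flatMap_eq_nil_iff.mpr
        intro q hq
        rw [PySem.List.mem_pyRange_one] at hq
        apply PySem.List.pyRange_one_eq_nil
        have : min hi (10 * q + 10) ≤ hi := by omega
        omega
      rw [htail, List.append_nil]
    · -- split the range at the end of the first decade and recurse
      have hm1 : lo ≤ 10 * q0 + 10 := by omega
      have hm2 : 10 * q0 + 10 ≤ hi := by omega
      rw [PySem.List.pyRange_one_append lo (10 * q0 + 10) hi hm1 hm2]
      have hmin : min hi (10 * q0 + 10) = 10 * q0 + 10 := by omega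
      rw [hmin]
      congr 1
      have hdiv : (10 * q0 + 10) / 10 = q0 + 1 := by omega
      have hrec := ih (10 * q0 + 10) hi (by omega)
      rw [hdiv] at hrec
      rw [hrec]
      apply List.flatMap_congr
      intro q hq
      rw [PySem.List.mem_pyRange_one] at hq
      have : max (10 * q0 + 10) (10 * q) = 10 * q := by omega
      have h2 : max lo (10 * q) = 10 * q := by omega
      rw [this, h2]

theorem n_groups_random_eq (n_customers n_first_id : Int)
    (hpre : Pre_n_groups_random n_customers n_first_id) :
    n_groups_random n_customers n_first_id = n_groups_random_alt n_customers n_first_id := by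
  unfold n_groups_random n_groups_random_alt
  simp only [PySem.Int.floordiv_eq_ediv_of_pos (by norm_num : (0:Int) < 10)]
  set lo := n_first_id
  set hi := n_customers + n_first_id with hhi
  congr 1
  rw [range_decade_decomp ((hi + 9) / 10 - lo / 10).toNat lo hi rfl,
      foldl_flatMap']
  apply PySem.List.foldl_congr_mem
  intro d q hq
  rw [PySem.List.mem_pyRange_one] at hq
  apply PySem.List.foldl_congr_mem
  intro d' i hi'
  rw [PySem.List.mem_pyRange_one] at hi'
  have hilo : lo ≤ i := le_trans (le_max_left _ _) hi'.1
  have hiq : 10 * q ≤ i := le_trans (le_max_right _ _) hi'.1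
  have hiub : i < 10 * q + 10 := lt_of_lt_of_le hi'.2 (min_le_right _ _)
  have hihi : i < hi := lt_of_lt_of_le hi'.2 (min_le_left _ _)
  have hlo0 : 0 ≤ lo := by
    rcases hpre with h | h
    · exfalso; omega
    · exact h
  have hq0 : 0 ≤ q := by omega
  have hds : sumDigitsA 0 i = dsumB 0 q + (i - 10 * q) := by
    rw [sumDigitsA_eq_dsumB i.toNat i rfl 0]
    conv_lhs => rw [show i = 10 * q + (i - 10 * q) by ring]
    rw [dsumB_decade q (i - 10 * q) hq0 (by omega) (by omega)]
  simp only [hds, step_insert_getD]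
  congr 2 <;> ring_nf

-- ===== VERDICT (by name: the statement is the Claim_ definition above) =====
theorem n_groups_random_spec : Claim_equal_n_groups_random := by
  intro n_customers n_first_id _ hpre
  unfold Spec_n_groups_random
  exact n_groups_random_eq n_customers n_first_id hpre
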